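-- pv_equiv track=rewrite | github.com/uw-math-ai/PolyArithmeticCircuitsRL | net.py | polynomial_distance
-- ===== SOURCE A (Python) =====
-- def polynomial_distance(poly1, poly2):
--     """Compute distance between polynomials vectors. We should change this"""
--     max_len = max(len(poly1), len(poly2))
--
--     distance = 0
--     for i in range(max_len):
--         val1 = poly1[i] if i < len(poly1) else 0
--         val2 = poly2[i] if i < len(poly2) else 0
--
--         if val1 != val2:
--             distance += 1
--
--     return distance
-- ===== SOURCE B (Python) =====
-- def polynomial_distance(poly1, poly2):
--     """Compute distance between polynomials vectors. We should change this"""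
--     # Inclusion-exclusion: a position of the zero-padded vectors differs iff
--     # at least one entry there is nonzero and the entries are not equal, so
--     # distance = #nonzero(poly1) + #nonzero(poly2)
--     #          - #(positions where both are nonzero)
--     #          - #(positions where both are equal and nonzero).
--     nonzero1 = sum(1 for v in poly1 if v != 0)
--     nonzero2 = sum(1 for v in poly2 if v != 0)
--     both_nonzero = sum(1 for a, b in zip(poly1, poly2) if a != 0 and b != 0)
--     equal_nonzero = sum(1 for a, b in zip(poly1, poly2) if a != 0 and a == b)
--     return nonzero1 + nonzero2 - both_nonzero - equal_nonzero
-- ===== Notes on version B (the rewrite author's own statement) =====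
-- stated objective: alternative
-- what changed: Replaces A's per-position compare-and-count over the padded index range by an inclusion-exclusion formula: count the nonzero entries of each vector and subtract the overlap corrections (positions where both are nonzero, and positions where they are equal and nonzero); no padded per-position inequality test is ever made.
import Mathlib
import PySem

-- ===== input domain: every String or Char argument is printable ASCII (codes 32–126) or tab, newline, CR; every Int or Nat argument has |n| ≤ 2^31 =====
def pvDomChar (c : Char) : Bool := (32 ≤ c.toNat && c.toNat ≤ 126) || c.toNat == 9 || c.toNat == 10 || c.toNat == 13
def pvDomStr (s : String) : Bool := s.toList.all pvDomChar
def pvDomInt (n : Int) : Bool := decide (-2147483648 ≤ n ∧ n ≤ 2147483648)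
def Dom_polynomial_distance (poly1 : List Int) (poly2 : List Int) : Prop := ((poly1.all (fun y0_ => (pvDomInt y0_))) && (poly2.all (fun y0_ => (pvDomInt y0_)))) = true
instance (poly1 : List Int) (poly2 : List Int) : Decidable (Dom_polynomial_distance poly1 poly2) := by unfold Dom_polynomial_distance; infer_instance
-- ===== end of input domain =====

-- B replaces A's per-position compare-and-count over the padded index range by an
-- inclusion-exclusion formula over global nonzero counts (alternative, same cost).

-- ===== PORT A =====
def polynomial_distance (poly1 : List Int) (poly2 : List Int) : Int :=
  let max_len : Int := max (poly1.length : Int) (poly2.length : Int)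
  (PySem.List.pyRange 0 max_len 1).foldl (fun distance i =>
    let val1 := if i < (poly1.length : Int) then PySem.List.pyGetD poly1 i 0 else 0
    let val2 := if i < (poly2.length : Int) then PySem.List.pyGetD poly2 i 0 else 0
    if val1 ≠ val2 then distance + 1 else distance) 0

-- ===== PORT B =====
def polynomial_distance_alt (poly1 : List Int) (poly2 : List Int) : Int :=
  let nonzero1 : Int := (poly1.countP (fun v => v != 0) : Nat)
  let nonzero2 : Int := (poly2.countP (fun v => v != 0) : Nat)
  let both_nonzero : Int := ((poly1.zip poly2).countP (fun p => p.1 != 0 && p.2 != 0) : Nat)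
  let equal_nonzero : Int := ((poly1.zip poly2).countP (fun p => p.1 != 0 && p.1 == p.2) : Nat)
  nonzero1 + nonzero2 - both_nonzero - equal_nonzero

-- ===== PRECONDITION & SPEC =====
def Spec_polynomial_distance (poly1 : List Int) (poly2 : List Int) (out : Int) : Prop := out = polynomial_distance_alt poly1 poly2
instance (poly1 : List Int) (poly2 : List Int) (out : Int) : Decidable (Spec_polynomial_distance poly1 poly2 out) := by unfold Spec_polynomial_distance; infer_instance

-- ===== CLAIM (what is proved, stated in full; the proofs are below) =====
def Claim_equal_polynomial_distance : Prop := ∀ (poly1 : List Int) (poly2 : List Int), Dom_polynomial_distance poly1 poly2 → Spec_polynomial_distance poly1 poly2 (polynomial_distance poly1 poly2)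

-- ===== LEMMAS AND PROOFS =====

-- common recursive characterisation of the distance
def pvDist : List Int → List Int → Nat
  | [], [] => 0
  | [], b :: bs => (if b ≠ 0 then 1 else 0) + pvDist [] bs
  | a :: as, [] => (if a ≠ 0 then 1 else 0) + pvDist as []
  | a :: as, b :: bs => (if a ≠ b then 1 else 0) + pvDist as bs

theorem pvDist_nil_right (p : List Int) :
    pvDist p [] = p.countP (fun v => v != 0) := by
  induction p with
  | nil => simp [pvDist]
  | cons a as ih =>
    simp only [pvDist, ih, List.countP_cons]
    split_ifs <;> simp_all <;> omega

theorem pvDist_nil_left (p : List Int) :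
    pvDist [] p = p.countP (fun v => v != 0) := by
  induction p with
  | nil => simp [pvDist]
  | cons a as ih =>
    simp only [pvDist, ih, List.countP_cons]
    split_ifs <;> simp_all <;> omega

-- getD absorbs A's in-range guard: out of range it is the padding 0 anyway
theorem ite_getD (p : List Int) (k : Nat) :
    (if (k : Int) < (p.length : Int) then p.getD k 0 else 0) = p.getD k 0 := by
  split_ifs with h
  · rfl
  · rw [List.getD_eq_default]
    omega

-- A's loop counts, over indices 0..max-1, the positions where the padded lists differ
theorem countP_range_eq_pvDist (p1 p2 : List Int) :
    (List.range (max p1.length p2.length)).countP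
      (fun k => p1.getD k 0 != p2.getD k 0) = pvDist p1 p2 := by
  induction p1 generalizing p2 with
  | nil =>
    induction p2 with
    | nil => simp [pvDist]
    | cons b bs ih =>
      simp only [List.length_nil, List.length_cons, Nat.max_eq_right (Nat.zero_le _)] at *
      rw [List.range_succ_eq_map, List.countP_cons, List.countP_map]
      simp only [List.getD_nil] at ih
      simp only [Function.comp_def, List.getD_nil, List.getD_cons_succ, List.getD_cons_zero]
      rw [ih]
      simp only [pvDist]
      split_ifs <;> simp_all <;> omega
  | cons a as ih =>
    cases p2 with
    | nil =>
      simp only [List.length_cons, List.length_nil, Nat.max_eq_left (Nat.zero_le _)]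
      rw [List.range_succ_eq_map, List.countP_cons, List.countP_map]
      simp only [Function.comp_def, List.getD_nil, List.getD_cons_succ, List.getD_cons_zero]
      have := ih []
      simp only [List.length_nil, Nat.max_eq_left (Nat.zero_le _), List.getD_nil] at this
      rw [this]
      simp only [pvDist]
      split_ifs <;> simp_all <;> omega
    | cons b bs =>
      simp only [List.length_cons, Nat.succ_max_succ]
      rw [List.range_succ_eq_map, List.countP_cons, List.countP_map]
      simp only [Function.comp_def, List.getD_cons_succ, List.getD_cons_zero]
      rw [ih bs]
      simp only [pvDist]
      split_ifs <;> simp_all <;> omega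

-- B's inclusion-exclusion formula equals the recursive characterisation
theorem alt_eq_pvDist (p1 p2 : List Int) :
    polynomial_distance_alt p1 p2 = (pvDist p1 p2 : Int) := by
  induction p1 generalizing p2 with
  | nil =>
    simp [polynomial_distance_alt, pvDist_nil_left]
  | cons a as ih =>
    cases p2 with
    | nil => simp [polynomial_distance_alt, pvDist_nil_right]
    | cons b bs =>
      have ihb := ih bs
      simp only [polynomial_distance_alt, List.zip_cons_cons, List.countP_cons, pvDist] at ihb ⊢
      push_cast at ihb ⊢
      split_ifs <;> simp_all <;> omega

-- A equals the recursive characterisation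
theorem a_eq_pvDist (p1 p2 : List Int) :
    polynomial_distance p1 p2 = (pvDist p1 p2 : Int) := by
  unfold polynomial_distance
  have hfold :
      ∀ (l : List Int) (init : Int),
        l.foldl (fun distance i =>
          let val1 := if i < (p1.length : Int) then PySem.List.pyGetD p1 i 0 else 0
          let val2 := if i < (p2.length : Int) then PySem.List.pyGetD p2 i 0 else 0
          if val1 ≠ val2 then distance + 1 else distance) init
        = init + (l.countP (fun i =>
            (if i < (p1.length : Int) then PySem.List.pyGetD p1 i 0 else 0) !=
            (if i < (p2.length : Int) then PySem.List.pyGetD p2 i 0 else 0)) : Nat) := by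
    intro l
    induction l with
    | nil => simp
    | cons x xs ihx =>
      intro init
      simp only [List.foldl_cons, List.countP_cons, ihx, bne_iff_ne, ne_eq]
      split_ifs with h <;> push_cast <;> omega
  rw [hfold, ← countP_range_eq_pvDist p1 p2]
  have hmax : max ((p1.length : Int)) ((p2.length : Int)) = ((max p1.length p2.length : Nat) : Int) := by
    push_cast; omega
  rw [hmax, PySem.List.pyRange_zero_natCast, List.countP_map, zero_add]
  congr 1
  apply List.countP_congr
  intro k _
  simp only [Function.comp_def, PySem.List.pyGetD_natCast, ite_getD]

-- ===== VERDICT (by name: the statement is the Claim_ definition above) =====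
theorem polynomial_distance_spec : Claim_equal_polynomial_distance := by
  intro p1 p2 _
  unfold Spec_polynomial_distance
  rw [a_eq_pvDist, alt_eq_pvDist]
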